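-- pv_equiv track=rewrite | github.com/k-amara/syntax-shap | shap2/explainers/_dependency.py | respects_order
-- ===== SOURCE A (Python) =====
-- def respects_order(index, causal_ordering):
--     for i in index:
--         # Find the position of i in causal_ordering
--         idx_position = next((pos for pos, sublist in enumerate(causal_ordering) if i in sublist), -1)
--
--         # Check if i is in causal_ordering
--         if idx_position == -1:
--             raise ValueError("Element not found in causal_ordering")
--
--         # Check for precedents if not in the root set (first element)
--         if idx_position > 0:
--             # Get precedents
--             precedents = [item for sublist in causal_ordering[:idx_position] for item in sublist]
--
--             # Check if all precedents are in index
--             if not set(precedents).issubset(set(index)):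
--                 return False
--
--     return True
-- ===== SOURCE B (Python) =====
-- def respects_order(index, causal_ordering):
--     # One pass to record each element's first level; then a single prefix check
--     # up to the maximal level any index element occupies.
--     level = {}
--     for pos, sublist in enumerate(causal_ordering):
--         for item in sublist:
--             if item not in level:
--                 level[item] = pos
--     idx_set = set(index)
--     m = 0
--     for i in index:
--         m = max(m, level[i])  # KeyError exactly where A raises ValueError
--     return all(item in idx_set for sublist in causal_ordering[:m] for item in sublist)
-- ===== Notes on version B (the rewrite author's own statement) =====
-- stated objective: faster
-- what changed: B precomputes each element's first level in one pass over causal_ordering and checks a single prefix up to the maximum level of the index elements, instead of re-scanning causal_ordering and rebuilding the precedent set for every index element.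
-- outside the precondition, e.g. on respects_order([2, 3], [[1], [2]]): A returns False, B raises KeyError
import Mathlib
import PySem

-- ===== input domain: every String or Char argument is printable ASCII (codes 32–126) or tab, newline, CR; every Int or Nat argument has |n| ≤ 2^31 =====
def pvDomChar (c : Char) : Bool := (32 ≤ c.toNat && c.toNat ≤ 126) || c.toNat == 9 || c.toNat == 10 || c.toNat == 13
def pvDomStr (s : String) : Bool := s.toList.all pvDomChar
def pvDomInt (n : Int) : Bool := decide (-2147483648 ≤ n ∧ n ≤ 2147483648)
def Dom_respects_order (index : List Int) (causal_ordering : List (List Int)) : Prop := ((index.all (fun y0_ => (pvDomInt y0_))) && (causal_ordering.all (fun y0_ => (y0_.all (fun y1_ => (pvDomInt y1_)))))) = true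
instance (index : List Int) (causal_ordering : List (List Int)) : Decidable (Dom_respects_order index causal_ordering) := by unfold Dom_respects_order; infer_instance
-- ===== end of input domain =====

-- B replaces A's per-element rescan of causal_ordering (precedent list rebuilt for every
-- index element) by one first-level pass plus a single prefix check; return values agree on Pre_.

-- ===== PORT A =====
-- next((pos for pos, sublist in enumerate(causal_ordering) if i in sublist), -1)
def findPosAux (i : Int) (co : List (List Int)) (pos : Int) : Int :=
  match co with
  | [] => -1
  | s :: rest => if i ∈ s then pos else findPosAux i rest (pos + 1)

def loopA (causal_ordering : List (List Int)) (index : List Int) : List Int → Bool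
  | [] => true
  | i :: rest =>
    let idx_position := findPosAux i causal_ordering 0
    if idx_position = -1 then
      false  -- Python raises ValueError here; excluded by Pre_respects_order
    else if idx_position > 0 then
      let precedents := (PySem.List.slice causal_ordering none (some idx_position)).flatMap (fun sublist => sublist)
      if PySem.Set.issubset (PySem.Set.ofList precedents) (PySem.Set.ofList index) then
        loopA causal_ordering index rest
      else false
    else loopA causal_ordering index rest

def respects_order (index : List Int) (causal_ordering : List (List Int)) : Bool :=
  loopA causal_ordering index index

-- ===== PORT B =====
-- level = {}; for pos, sublist in enumerate(causal_ordering):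
--   for item in sublist: if item not in level: level[item] = pos
def buildLevel (causal_ordering : List (List Int)) : PySem.Dict Int Int :=
  (PySem.List.enumerate causal_ordering 0).foldl
    (fun d ps => ps.2.foldl (fun d item => if d.contains item then d else d.insert item ps.1) d)
    PySem.Dict.empty

def respects_order_alt (index : List Int) (causal_ordering : List (List Int)) : Bool :=
  let level := buildLevel causal_ordering
  let idx_set := PySem.Set.ofList index
  -- level[i] raises KeyError outside Pre_respects_order; getD 0 stands in there (unclaimed inputs)
  let m := index.foldl (fun m i => max m (level.getD i 0)) 0
  ((PySem.List.slice causal_ordering none (some m)).flatMap (fun sublist => sublist)).all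
    (fun item => PySem.Set.contains idx_set item)

-- ===== PRECONDITION & SPEC =====
-- Pre_ excludes inputs where some index element occurs in no sublist of causal_ordering:
-- A raises ValueError there unless an earlier index element already failed the precedent
-- check (an early False that is an artifact of A's scan order); B raises KeyError there.
def Pre_respects_order (index : List Int) (causal_ordering : List (List Int)) : Prop :=
  ∀ i ∈ index, ∃ s ∈ causal_ordering, i ∈ s
instance (index : List Int) (causal_ordering : List (List Int)) : Decidable (Pre_respects_order index causal_ordering) := by unfold Pre_respects_order; infer_instance

def pvWitness_respects_order : List Int × List (List Int) := ([1, 2, 3], [[1, 2], [3]])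

def Spec_respects_order (index : List Int) (causal_ordering : List (List Int)) (out : Bool) : Prop := out = respects_order_alt index causal_ordering
instance (index : List Int) (causal_ordering : List (List Int)) (out : Bool) : Decidable (Spec_respects_order index causal_ordering out) := by unfold Spec_respects_order; infer_instance

-- ===== CLAIM (what is proved, stated in full; the proofs are below) =====
def Claim_equal_respects_order : Prop := ∀ (index : List Int) (causal_ordering : List (List Int)), Dom_respects_order index causal_ordering → Pre_respects_order index causal_ordering → Spec_respects_order index causal_ordering (respects_order index causal_ordering)

-- ===== LEMMAS AND PROOFS =====

-- first position ≥ pos of a sublist containing i, as an Option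
def posOpt (i : Int) (co : List (List Int)) (pos : Int) : Option Int :=
  match co with
  | [] => none
  | s :: rest => if i ∈ s then some pos else posOpt i rest (pos + 1)

theorem findPosAux_eq_posOpt (i : Int) (co : List (List Int)) (p : Int) :
    findPosAux i co p = (posOpt i co p).getD (-1) := by
  induction co generalizing p with
  | nil => rfl
  | cons s rest ih =>
    simp only [findPosAux, posOpt]
    split_ifs <;> simp [ih]

theorem posOpt_isSome_iff (i : Int) (co : List (List Int)) (p : Int) :
    (posOpt i co p).isSome ↔ ∃ s ∈ co, i ∈ s := by
  induction co generalizing p with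
  | nil => simp [posOpt]
  | cons s rest ih =>
    simp only [posOpt]
    split_ifs with h <;> simp [h, ih]

theorem posOpt_ge (i : Int) (co : List (List Int)) (p q : Int)
    (h : posOpt i co p = some q) : p ≤ q := by
  induction co generalizing p with
  | nil => simp [posOpt] at h
  | cons s rest ih =>
    simp only [posOpt] at h
    split_ifs at h with hm
    · simp at h; omega
    · have := ih (p + 1) h; omega

-- the inner 'if item not in level: level[item] = pos' fold
theorem innerFold_get? (s : List Int) (d : PySem.Dict Int Int) (p i : Int) :
    (s.foldl (fun d item => if d.contains item then d else d.insert item p) d).get? i =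
      if i ∈ s ∧ d.contains i = false then some p else d.get? i := by
  induction s generalizing d with
  | nil => simp
  | cons x s' ih =>
    simp only [List.foldl_cons]
    by_cases hxi : x = i
    · subst hxi
      by_cases hc : d.contains x
      · simp [hc, ih]
      · simp [hc, ih, PySem.Dict.contains_insert_self, PySem.Dict.get?_insert_self]
    · by_cases hc : d.contains x
      · simp [hc, ih, Ne.symm hxi]
      · simp [hc, ih, PySem.Dict.contains_insert, PySem.Dict.get?_insert_of_ne _ _ (Ne.symm hxi)]
        by_cases hm : i ∈ s' <;> simp [hm, Ne.symm hxi]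

theorem buildLevel_get?_gen (co : List (List Int)) (d : PySem.Dict Int Int) (p i : Int) :
    ((PySem.List.enumerate co p).foldl
        (fun d ps => ps.2.foldl (fun d item => if d.contains item then d else d.insert item ps.1) d)
        d).get? i =
      if d.contains i then d.get? i else posOpt i co p := by
  induction co generalizing d p with
  | nil =>
    by_cases hc : d.contains i
    · simp [PySem.List.enumerate_nil, hc]
    · simp only [Bool.not_eq_true] at hc
      simp [PySem.List.enumerate_nil, hc, posOpt, (PySem.Dict.get?_eq_none_iff_contains d i).mpr hc]
  | cons s rest ih =>
    rw [PySem.List.enumerate_cons, List.foldl_cons, ih]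
    have hg := innerFold_get? s d p i
    have hcont : ∀ (e : PySem.Dict Int Int), e.contains i = (e.get? i).isSome :=
      fun e => PySem.Dict.contains_eq_isSome_get? e i
    by_cases hm : i ∈ s <;> by_cases hc : d.contains i = true
    · simp [hm, hc, hg, hcont]
      intro hnone
      rw [(PySem.Dict.get?_eq_none_iff_contains d i).mp hnone] at hc
      exact absurd hc (by simp)
    · simp only [Bool.not_eq_true] at hc
      simp [posOpt, hm, hc, hg, hcont]
    · simp [hm, hc, hg, hcont]
      intro hnone
      rw [(PySem.Dict.get?_eq_none_iff_contains d i).mp hnone] at hc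
      exact absurd hc (by simp)
    · simp only [Bool.not_eq_true] at hc
      simp [posOpt, hm, hc, hg, hcont, (PySem.Dict.get?_eq_none_iff_contains d i).mpr hc]

theorem buildLevel_getD (co : List (List Int)) (i q : Int)
    (h : posOpt i co 0 = some q) : (buildLevel co).getD i 0 = q := by
  have hg : (buildLevel co).get? i = some q := by
    rw [buildLevel, buildLevel_get?_gen]
    simp [PySem.Dict.contains_empty, h]
  rw [PySem.Dict.getD_eq_get?_getD, hg]; rfl

-- the prefix check both programs perform
def prefOk (index : List Int) (co : List (List Int)) (p : Int) : Prop :=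
  ∀ x ∈ (co.take p.toNat).flatMap (fun s => s), x ∈ index

theorem sub_iff (ca : List (List Int)) (index : List Int) (q : Int) (h0 : 0 ≤ q) :
    (PySem.Set.issubset
      (PySem.Set.ofList ((PySem.List.slice ca none (some q)).flatMap (fun sublist => sublist)))
      (PySem.Set.ofList index) = true) ↔ prefOk index ca q := by
  rw [PySem.Set.issubset_iff, PySem.List.slice_to ca h0]
  unfold prefOk
  constructor
  · intro h x hx
    exact (PySem.Set.mem_ofList _ _).mp (h x ((PySem.Set.mem_ofList _ _).mpr hx))
  · intro h x hx
    exact (PySem.Set.mem_ofList _ _).mpr (h x ((PySem.Set.mem_ofList _ _).mp hx))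

theorem prefOk_zero (index : List Int) (ca : List (List Int)) : prefOk index ca 0 := by
  intro x hx; simp at hx

theorem loopA_iff (ca : List (List Int)) (index : List Int) :
    ∀ rest : List Int, (∀ i ∈ rest, ∃ s ∈ ca, i ∈ s) →
      (loopA ca index rest = true ↔
        ∀ i ∈ rest, prefOk index ca (findPosAux i ca 0))
  | [], _ => by simp [loopA]
  | i :: rest, hpre => by
    obtain ⟨s, hs, his⟩ := hpre i List.mem_cons_self
    obtain ⟨q, hq⟩ := Option.isSome_iff_exists.mp ((posOpt_isSome_iff i ca 0).mpr ⟨s, hs, his⟩)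
    have hq0 : (0 : Int) ≤ q := posOpt_ge i ca 0 q hq
    have hfp : findPosAux i ca 0 = q := by rw [findPosAux_eq_posOpt, hq]; rfl
    have ihr := loopA_iff ca index rest (fun j hj => hpre j (List.mem_cons_of_mem _ hj))
    simp only [loopA, hfp]
    rw [if_neg (by omega)]
    by_cases hq1 : q > 0
    · rw [if_pos hq1]
      by_cases hsub : PySem.Set.issubset
          (PySem.Set.ofList ((PySem.List.slice ca none (some q)).flatMap (fun sublist => sublist)))
          (PySem.Set.ofList index) = true
      · rw [if_pos hsub, ihr]
        have hpq : prefOk index ca q := (sub_iff ca index q hq0).mp hsub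
        constructor
        · intro h j hj
          rcases List.mem_cons.mp hj with rfl | hj'
          · rw [hfp]; exact hpq
          · exact h j hj'
        · intro h j hj; exact h j (List.mem_cons_of_mem _ hj)
      · rw [if_neg hsub]
        constructor
        · intro h; exact absurd h (by simp)
        · intro h
          exact absurd ((sub_iff ca index q hq0).mpr (hfp ▸ h i List.mem_cons_self)) hsub
    · rw [if_neg hq1, ihr]
      have hq' : q = 0 := by omega
      constructor
      · intro h j hj
        rcases List.mem_cons.mp hj with rfl | hj'
        · rw [hfp, hq']; exact prefOk_zero index ca
        · exact h j hj'
      · intro h j hj; exact h j (List.mem_cons_of_mem _ hj)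

theorem prefOk_mono (index : List Int) (co : List (List Int)) (p q : Int)
    (hq : q ≤ p) (h : prefOk index co p) : prefOk index co q := by
  intro x hx
  apply h
  simp only [List.mem_flatMap] at hx ⊢
  obtain ⟨s, hs, hxs⟩ := hx
  exact ⟨s, List.take_subset_take_left co (by omega) hs, hxs⟩

theorem foldl_max_init_le (l : List Int) (f : Int → Int) (a : Int) :
    a ≤ l.foldl (fun m i => max m (f i)) a := by
  induction l generalizing a with
  | nil => simp
  | cons x xs ih => exact le_trans (le_max_left _ _) (ih (max a (f x)))

theorem foldl_max_mem_le (l : List Int) (f : Int → Int) (a : Int) (i : Int) (h : i ∈ l) :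
    f i ≤ l.foldl (fun m i => max m (f i)) a := by
  induction l generalizing a with
  | nil => simp at h
  | cons x xs ih =>
    rcases List.mem_cons.mp h with rfl | h'
    · exact le_trans (le_max_right _ _) (foldl_max_init_le xs f _)
    · exact ih (max a (f x)) h'

theorem foldl_max_attained (l : List Int) (f : Int → Int) (a : Int) :
    l.foldl (fun m i => max m (f i)) a = a ∨
      ∃ i ∈ l, l.foldl (fun m i => max m (f i)) a = f i := by
  induction l generalizing a with
  | nil => left; rfl
  | cons x xs ih =>
    rcases ih (max a (f x)) with h | ⟨i, hi, hfi⟩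
    · simp only [List.foldl_cons, h]
      rcases max_choice a (f x) with h' | h'
      · left; exact h'
      · right; exact ⟨x, List.mem_cons_self, h'⟩
    · right; exact ⟨i, List.mem_cons_of_mem _ hi, hfi⟩

theorem main_eq (index : List Int) (ca : List (List Int))
    (hpre : ∀ i ∈ index, ∃ s ∈ ca, i ∈ s) :
    respects_order index ca = respects_order_alt index ca := by
  have hgd : ∀ i ∈ index, (buildLevel ca).getD i 0 = findPosAux i ca 0 := by
    intro i hi
    obtain ⟨q, hq⟩ := Option.isSome_iff_exists.mp
      ((posOpt_isSome_iff i ca 0).mpr (hpre i hi))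
    rw [buildLevel_getD ca i q hq, findPosAux_eq_posOpt, hq]; rfl
  rw [Bool.eq_iff_iff]
  simp only [respects_order, respects_order_alt]
  rw [loopA_iff ca index index hpre]
  have hmrw : index.foldl (fun m i => max m ((buildLevel ca).getD i 0)) 0
      = index.foldl (fun m i => max m (findPosAux i ca 0)) 0 :=
    PySem.List.foldl_congr_mem index _ _ 0 (fun acc x hx => by rw [hgd x hx])
  rw [hmrw]
  set M := index.foldl (fun m i => max m (findPosAux i ca 0)) 0 with hMdef
  have hM0 : 0 ≤ M := foldl_max_init_le index _ 0
  have hBiff : (((PySem.List.slice ca none (some M)).flatMap (fun sublist => sublist)).all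
      (fun item => PySem.Set.contains (PySem.Set.ofList index) item) = true) ↔ prefOk index ca M := by
    rw [PySem.List.slice_to ca hM0, List.all_eq_true]
    unfold prefOk
    constructor
    · intro h x hx
      exact (PySem.Set.mem_ofList _ _).mp ((PySem.Set.contains_iff _ _).mp (h x hx))
    · intro h x hx
      exact (PySem.Set.contains_iff _ _).mpr ((PySem.Set.mem_ofList _ _).mpr (h x hx))
  rw [hBiff]
  constructor
  · intro h
    rcases foldl_max_attained index (fun i => findPosAux i ca 0) 0 with hz | ⟨i, hi, hfi⟩
    · rw [← hMdef] at hz; rw [hz]; exact prefOk_zero index ca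
    · rw [← hMdef] at hfi; rw [hfi]; exact h i hi
  · intro h i hi
    exact prefOk_mono index ca M (findPosAux i ca 0)
      (foldl_max_mem_le index _ 0 i hi) h

-- ===== VERDICT (by name: the statement is the Claim_ definition above) =====
theorem respects_order_spec : Claim_equal_respects_order := by
  intro index causal_ordering _ hpre
  exact main_eq index causal_ordering hpre
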